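-- pv_equiv track=rewrite | github.com/karthikyammanur/arkos | Model_/sego_data_processor.py | _extract_financial_metrics
-- ===== SOURCE A (Python) =====
-- def _extract_financial_metrics(tables):
--     """Extract key financial metrics from tables."""
--     financial_metrics = {
--         "operational_costs": None,
--         "infrastructure_spending": None,
--         "renewable_investments": None,
--         "revenue": None
--     }
--
--     # This is a simplified example - in a real implementation, you would need
--     # more sophisticated logic to identify and extract specific financial metrics
--     for table in tables:
--         for row in table["processed_data"]:
--             # Look for operational costs
--             if any(key in str(row).lower() for key in ["operational cost", "operating expense", "opex"]):
--                 # Extract the value (this is simplified)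
--                 for key, value in row.items():
--                     if isinstance(value, str) and any(c.isdigit() for c in value):
--                         financial_metrics["operational_costs"] = value
--
--             # Look for infrastructure spending
--             if any(key in str(row).lower() for key in ["infrastructure", "capital expenditure", "capex"]):
--                 for key, value in row.items():
--                     if isinstance(value, str) and any(c.isdigit() for c in value):
--                         financial_metrics["infrastructure_spending"] = value
--
--             # Look for renewable investments
--             if any(key in str(row).lower() for key in ["renewable", "solar", "wind", "green energy"]):
--                 for key, value in row.items():
--                     if isinstance(value, str) and any(c.isdigit() for c in value):
--                         financial_metrics["renewable_investments"] = value
--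
--             # Look for revenue
--             if any(key in str(row).lower() for key in ["revenue", "income", "earnings"]):
--                 for key, value in row.items():
--                     if isinstance(value, str) and any(c.isdigit() for c in value):
--                         financial_metrics["revenue"] = value
--
--     return financial_metrics
-- ===== SOURCE B (Python) =====
-- def _extract_financial_metrics(tables):
--     """Extract key financial metrics: precompute per-row (lowered text, digit values),
--     then answer each metric by one backward search with early exit."""
--     rows = []
--     for table in tables:
--         for row in table["processed_data"]:
--             digits = [v for v in row.values()
--                       if isinstance(v, str) and any(c.isdigit() for c in v)]
--             rows.append((str(row).lower(), digits))
--
--     groups = [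
--         ("operational_costs", ["operational cost", "operating expense", "opex"]),
--         ("infrastructure_spending", ["infrastructure", "capital expenditure", "capex"]),
--         ("renewable_investments", ["renewable", "solar", "wind", "green energy"]),
--         ("revenue", ["revenue", "income", "earnings"]),
--     ]
--     out = {}
--     for name, keys in groups:
--         val = None
--         for s, digits in reversed(rows):
--             if digits and any(k in s for k in keys):
--                 val = digits[-1]
--                 break
--         out[name] = val
--     return out
-- ===== Notes on version B (the rewrite author's own statement) =====
-- stated objective: alternative
-- what changed: B flattens all rows once into (lowered repr, digit-bearing values) pairs, then answers each metric independently by a single backward search with early exit (first matching row from the end wins), instead of A's forward fold that rescans and overwrites four accumulators per row.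
import Mathlib
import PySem

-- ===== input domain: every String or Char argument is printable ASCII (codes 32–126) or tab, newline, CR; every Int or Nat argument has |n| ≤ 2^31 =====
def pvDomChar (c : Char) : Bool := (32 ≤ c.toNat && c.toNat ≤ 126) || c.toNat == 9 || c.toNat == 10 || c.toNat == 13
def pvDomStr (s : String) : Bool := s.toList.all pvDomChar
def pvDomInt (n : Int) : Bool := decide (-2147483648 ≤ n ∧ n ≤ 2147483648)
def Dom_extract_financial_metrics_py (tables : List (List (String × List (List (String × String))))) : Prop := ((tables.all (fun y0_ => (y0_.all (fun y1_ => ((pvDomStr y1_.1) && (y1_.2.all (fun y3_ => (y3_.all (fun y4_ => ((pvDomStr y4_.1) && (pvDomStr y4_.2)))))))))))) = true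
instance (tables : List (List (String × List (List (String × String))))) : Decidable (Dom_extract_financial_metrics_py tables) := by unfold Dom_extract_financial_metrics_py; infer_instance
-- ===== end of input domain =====

-- B flattens the rows once into (lowered repr, digit-bearing values) pairs and answers each
-- metric by a backward search with early exit, instead of A's forward four-accumulator fold
-- (objective: alternative; equivalence on return value).

-- shared hand-ported Python primitives (str(dict) has no PySem primitive):
-- repr of a str (exact for printable ASCII plus tab/newline/CR: Python escapes only \, the
-- chosen quote, \t, \n, \r there; quote is ' unless the string has ' and no ")
def pvReprStr (s : String) : List Char :=
  let q : Char := if s.toList.contains '\'' && !(s.toList.contains '"') then '"' else '\''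
  q :: (s.toList.flatMap (fun c =>
      if c = '\\' then ['\\', '\\']
      else if c = q then ['\\', q]
      else if c = '\t' then ['\\', 't']
      else if c = '\n' then ['\\', 'n']
      else if c = '\r' then ['\\', 'r']
      else [c])) ++ [q]

-- str(row) for a dict of str→str: "{'k': 'v', ...}" (exact on the domain above)
def pvReprRow (row : List (String × String)) : List Char :=
  '{' :: (List.intercalate [',', ' ']
    (row.map (fun kv => pvReprStr kv.1 ++ [':', ' '] ++ pvReprStr kv.2))) ++ ['}']

-- str(row).lower()
def pvRowText (row : List (String × String)) : List Char := PySem.Chars.lower (pvReprRow row)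

-- any(key in str(row).lower() for key in keys)
def pvAnyKey (keys : List String) (row : List (String × String)) : Bool :=
  keys.any (fun k => PySem.Chars.isIn k.toList (pvRowText row))

-- isinstance(value, str) and any(c.isdigit() for c in value)  (isinstance is always True here)
def pvHasDigit (v : String) : Bool := v.toList.any PySem.Chars.isdigit

-- ===== PORT A =====
-- the inner 'for key, value in row.items(): if …digit…: metrics[k] = value' loop, from acc
def pvScanA (acc : Option String) (row : List (String × String)) : Option String :=
  row.foldl (fun a kv => if pvHasDigit kv.2 then some kv.2 else a) acc

-- one row of A's body: four independent keyword checks, each rescanning the items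
def pvStepA (st : Option String × Option String × Option String × Option String)
    (row : List (String × String)) :
    Option String × Option String × Option String × Option String :=
  let oc := if pvAnyKey ["operational cost", "operating expense", "opex"] row then pvScanA st.1 row else st.1
  let inf := if pvAnyKey ["infrastructure", "capital expenditure", "capex"] row then pvScanA st.2.1 row else st.2.1
  let ren := if pvAnyKey ["renewable", "solar", "wind", "green energy"] row then pvScanA st.2.2.1 row else st.2.2.1
  let rev := if pvAnyKey ["revenue", "income", "earnings"] row then pvScanA st.2.2.2 row else st.2.2.2
  (oc, inf, ren, rev)

-- table["processed_data"]: first-match lookup; KeyError (no such key) is excluded by Pre_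
def extract_financial_metrics_py (tables : List (List (String × List (List (String × String))))) :
    List (String × Option String) :=
  let st := tables.foldl
    (fun st table => ((List.lookup "processed_data" table).getD []).foldl pvStepA st)
    (none, none, none, none)
  [("operational_costs", st.1), ("infrastructure_spending", st.2.1),
   ("renewable_investments", st.2.2.1), ("revenue", st.2.2.2)]

-- ===== PORT B =====
-- per-row precomputation: (str(row).lower(), [v for v in row.values() if … digit …])
def pvRowInfo (row : List (String × String)) : List Char × List String :=
  (pvRowText row, row.filterMap (fun kv => if pvHasDigit kv.2 then some kv.2 else none))

-- the flattened rows list Source B builds first (nested append loop = flatMap)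
def pvRows (tables : List (List (String × List (List (String × String))))) :
    List (List Char × List String) :=
  tables.flatMap (fun table => ((List.lookup "processed_data" table).getD []).map pvRowInfo)

def pvGroups : List (String × List String) :=
  [("operational_costs", ["operational cost", "operating expense", "opex"]),
   ("infrastructure_spending", ["infrastructure", "capital expenditure", "capex"]),
   ("renewable_investments", ["renewable", "solar", "wind", "green energy"]),
   ("revenue", ["revenue", "income", "earnings"])]

-- Source B's 'for s, digits in reversed(rows): if digits and any(k in s): val = digits[-1]; break'
-- (digits[-1] on the guarded-nonempty list = getLast?)
def pvFindB (keys : List String) : List (List Char × List String) → Option String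
  | [] => none
  | (s, digits) :: rest =>
      if !digits.isEmpty && keys.any (fun k => PySem.Chars.isIn k.toList s) then digits.getLast?
      else pvFindB keys rest

def extract_financial_metrics_py_alt (tables : List (List (String × List (List (String × String))))) :
    List (String × Option String) :=
  let rows := pvRows tables
  pvGroups.map (fun g => (g.1, pvFindB g.2 rows.reverse))

-- ===== PRECONDITION & SPEC =====
-- Pre_ excludes exactly the inputs where Python A raises KeyError: a table without a
-- "processed_data" key.
def Pre_extract_financial_metrics_py (tables : List (List (String × List (List (String × String))))) : Prop :=
  tables.all (fun table => table.any (fun kv => kv.1 == "processed_data")) = true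
instance (tables : List (List (String × List (List (String × String))))) : Decidable (Pre_extract_financial_metrics_py tables) := by unfold Pre_extract_financial_metrics_py; infer_instance

def pvWitness_extract_financial_metrics_py : (List (List (String × List (List (String × String))))) :=
  [[("processed_data", [[("metric", "opex"), ("q1", "100")]])]]

def Spec_extract_financial_metrics_py (tables : List (List (String × List (List (String × String))))) (out : List (String × Option String)) : Prop := out = extract_financial_metrics_py_alt tables
instance (tables : List (List (String × List (List (String × String))))) (out : List (String × Option String)) : Decidable (Spec_extract_financial_metrics_py tables out) := by unfold Spec_extract_financial_metrics_py; infer_instance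

-- ===== CLAIM =====
def Claim_equal_extract_financial_metrics_py : Prop := ∀ (tables : List (List (String × List (List (String × String))))), Dom_extract_financial_metrics_py tables → Pre_extract_financial_metrics_py tables → Spec_extract_financial_metrics_py tables (extract_financial_metrics_py tables)

-- ===== LEMMAS AND PROOFS =====

-- one component of A's per-row step
def pvStep1 (keys : List String) (acc : Option String) (row : List (String × String)) :
    Option String :=
  if pvAnyKey keys row then pvScanA acc row else acc

-- the per-row write of one component, as an Option
def pvWrite (keys : List String) (row : List (String × String)) : Option String :=
  if pvAnyKey keys row then pvScanA none row else none

-- A's inner scan from acc = the scan from none, falling back to acc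
lemma pvScanA_eq (row : List (String × String)) (acc : Option String) :
    pvScanA acc row = Option.or (pvScanA none row) acc := by
  induction row generalizing acc with
  | nil => rfl
  | cons kv t ih =>
      rw [show pvScanA acc (kv :: t)
            = pvScanA (if pvHasDigit kv.2 then some kv.2 else acc) t from rfl,
          show pvScanA none (kv :: t)
            = pvScanA (if pvHasDigit kv.2 then some kv.2 else none) t from rfl,
          ih (if pvHasDigit kv.2 then some kv.2 else acc),
          ih (if pvHasDigit kv.2 then some kv.2 else none)]
      cases pvScanA none t <;> by_cases h : pvHasDigit kv.2 = true <;> simp [h, Option.or]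

-- the scan from none = last digit-bearing value (B's digits[-1])
lemma pvScanA_none_eq (row : List (String × String)) :
    pvScanA none row
      = (row.filterMap (fun kv => if pvHasDigit kv.2 then some kv.2 else none)).getLast? := by
  induction row with
  | nil => rfl
  | cons kv t ih =>
      rw [show pvScanA none (kv :: t)
            = pvScanA (if pvHasDigit kv.2 then some kv.2 else none) t from rfl,
          pvScanA_eq t (if pvHasDigit kv.2 then some kv.2 else none), ih]
      by_cases h : pvHasDigit kv.2 = true <;> simp [h, List.getLast?_cons]

-- a forward fold of one component = backward findSome? of the per-row write, over acc
lemma pvFold1_eq (keys : List String) (rows : List (List (String × String)))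
    (acc : Option String) :
    rows.foldl (pvStep1 keys) acc
      = Option.or (rows.reverse.findSome? (pvWrite keys)) acc := by
  induction rows using List.reverseRecOn generalizing acc with
  | nil => rfl
  | append_singleton t r ih =>
      rw [List.foldl_append, List.reverse_append]
      simp only [List.foldl_cons, List.foldl_nil, List.reverse_singleton,
        List.singleton_append, List.findSome?_cons]
      rw [show t.foldl (pvStep1 keys) acc = Option.or (t.reverse.findSome? (pvWrite keys)) acc from ih acc] at *
      unfold pvStep1 pvWrite
      by_cases h : pvAnyKey keys r = true
      · rw [pvScanA_eq]
        cases hs : pvScanA none r <;> simp [h, Option.or]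
      · simp [h]

-- B's backward search over the mapped rows = findSome? of the per-row write
lemma pvFindB_eq (keys : List String) (rows : List (List (String × String))) :
    pvFindB keys (rows.map pvRowInfo) = rows.findSome? (pvWrite keys) := by
  induction rows with
  | nil => rfl
  | cons r t ih =>
      rw [List.map_cons, List.findSome?_cons,
          show pvRowInfo r
            = (pvRowText r, r.filterMap (fun kv => if pvHasDigit kv.2 then some kv.2 else none)) from rfl]
      by_cases h : (keys.any fun k => PySem.Chars.isIn k.toList (pvRowText r)) = true
      · cases hl : r.filterMap (fun kv => if pvHasDigit kv.2 then some kv.2 else none) with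
        | nil => simp [pvFindB, pvWrite, pvAnyKey, pvScanA_none_eq, hl, h, ih]
        | cons a l =>
            simp only [pvFindB, pvWrite, pvAnyKey, pvScanA_none_eq, hl, h, List.isEmpty_cons,
              Bool.not_false, Bool.true_and, if_pos]
            cases hg : (a :: l).getLast? with
            | none => simp [List.getLast?_eq_none_iff] at hg
            | some v => simp
      · simp only [Bool.not_eq_true] at h
        simp [pvFindB, pvWrite, pvAnyKey, h, ih]

-- the 4-tuple fold splits into component folds
lemma pvStepA_split (rows : List (List (String × String)))
    (st : Option String × Option String × Option String × Option String) :
    rows.foldl pvStepA st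
      = (rows.foldl (pvStep1 ["operational cost", "operating expense", "opex"]) st.1,
         rows.foldl (pvStep1 ["infrastructure", "capital expenditure", "capex"]) st.2.1,
         rows.foldl (pvStep1 ["renewable", "solar", "wind", "green energy"]) st.2.2.1,
         rows.foldl (pvStep1 ["revenue", "income", "earnings"]) st.2.2.2) := by
  induction rows generalizing st with
  | nil => rfl
  | cons r t ih => simp only [List.foldl_cons]; rw [ih]; rfl

-- the nested tables/rows fold = one fold over the flattened rows
lemma pvFlatten (tables : List (List (String × List (List (String × String)))))
    (st : Option String × Option String × Option String × Option String) :
    tables.foldl (fun st table => ((List.lookup "processed_data" table).getD []).foldl pvStepA st) st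
      = (tables.flatMap (fun table => (List.lookup "processed_data" table).getD [])).foldl pvStepA st := by
  induction tables generalizing st with
  | nil => rfl
  | cons t ts ih => simp only [List.foldl_cons, List.flatMap_cons, List.foldl_append, ih]

-- ===== VERDICT =====
theorem extract_financial_metrics_py_spec : Claim_equal_extract_financial_metrics_py := by
  intro tables _ _
  unfold Spec_extract_financial_metrics_py extract_financial_metrics_py extract_financial_metrics_py_alt
  rw [pvFlatten]
  set flat := tables.flatMap (fun table => (List.lookup "processed_data" table).getD []) with hflat
  rw [pvStepA_split]
  have hrows : pvRows tables = flat.map pvRowInfo := by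
    rw [hflat, pvRows, List.map_flatMap]
  simp only [pvGroups, List.map_cons, List.map_nil, hrows, ← List.map_reverse, pvFindB_eq]
  rw [pvFold1_eq, pvFold1_eq, pvFold1_eq, pvFold1_eq]
  simp only [Option.or_none]
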